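-- pv_equiv track=rewrite | github.com/janga1997/Web-Apps | pset1/pset1_3.py | item_order
-- ===== SOURCE A (Python) =====
-- def item_order(order):
--     array=order.split()
--
--     burger_count=0
--     water_count=0
--     salad_count=0
--
--     for i in array:
--         if(i=='salad'):
--             salad_count=salad_count+1
--
--         elif(i=='hamburger'):
--             burger_count=burger_count+1
--
--         else:
--             water_count=water_count+1
--
--
--     return "salad:" + str(salad_count) + " hamburger:" + str(burger_count)+ " water:" +str(water_count)
-- ===== SOURCE B (Python) =====
-- def item_order(order):
--     words = sorted(order.split())
--     def rank(x, inclusive):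
--         # binary search on the sorted word list: number of words < x (<= x if inclusive)
--         lo, hi = 0, len(words)
--         while lo < hi:
--             mid = (lo + hi) // 2
--             if words[mid] < x or (inclusive and words[mid] == x):
--                 lo = mid + 1
--             else:
--                 hi = mid
--         return lo
--     salad_count = rank('salad', True) - rank('salad', False)
--     burger_count = rank('hamburger', True) - rank('hamburger', False)
--     water_count = len(words) - salad_count - burger_count
--     return "salad:" + str(salad_count) + " hamburger:" + str(burger_count) + " water:" + str(water_count)
-- ===== Notes on version B (the rewrite author's own statement) =====
-- stated objective: alternative
-- what changed: Instead of a three-counter conditional loop, B sorts the word list and locates the salad and hamburger counts as index differences of hand-written lower/upper-bound binary searches, deriving water by subtraction from the total length.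
import Mathlib
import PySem

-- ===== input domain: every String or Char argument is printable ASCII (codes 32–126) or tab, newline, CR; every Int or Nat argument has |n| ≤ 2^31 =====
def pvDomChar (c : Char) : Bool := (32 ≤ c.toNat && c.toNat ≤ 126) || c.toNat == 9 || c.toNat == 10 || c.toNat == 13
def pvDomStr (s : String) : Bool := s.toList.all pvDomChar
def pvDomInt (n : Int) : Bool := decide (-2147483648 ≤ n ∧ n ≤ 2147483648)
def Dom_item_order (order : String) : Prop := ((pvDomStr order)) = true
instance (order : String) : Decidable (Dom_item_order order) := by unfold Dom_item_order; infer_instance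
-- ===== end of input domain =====

-- B sorts the word list and reads the salad/hamburger counts off as index differences of
-- hand-written lower/upper-bound binary searches, deriving water by subtraction (alternative algorithm).

-- ===== PORT A =====
-- state = (burger_count, water_count, salad_count); loop checks 'salad' then 'hamburger' else water
def item_order (order : String) : String :=
  let array := PySem.Str.split₀ order
  let st : Int × Int × Int :=
    array.foldl (fun st i =>
      if i = "salad" then (st.1, st.2.1, st.2.2 + 1)
      else if i = "hamburger" then (st.1 + 1, st.2.1, st.2.2)
      else (st.1, st.2.1 + 1, st.2.2)) (0, 0, 0)
  "salad:" ++ PySem.Int.toStr st.2.2 ++ " hamburger:" ++ PySem.Int.toStr st.1 ++ " water:" ++ PySem.Int.toStr st.2.1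

-- ===== PORT B =====
-- rank(x, inclusive): Python's while-lo<hi binary search on the sorted word list
-- (lo, hi stay ≥ 0 in Python, so Nat with Nat division matches (lo+hi)//2 exactly)
def pvRank (words : List String) (x : String) (inclusive : Bool) (lo hi : Nat) : Nat :=
  if _h : lo < hi then
    let w := PySem.List.pyGetD words (((lo + hi) / 2 : Nat) : Int) ""
    if w < x ∨ (inclusive = true ∧ w = x) then pvRank words x inclusive ((lo + hi) / 2 + 1) hi
    else pvRank words x inclusive lo ((lo + hi) / 2)
  else lo
termination_by hi - lo
decreasing_by all_goals omega

def item_order_alt (order : String) : String :=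
  let words := PySem.List.sorted (PySem.Str.split₀ order) (fun x => x) false
  let salad_count : Int :=
    (pvRank words "salad" true 0 words.length : Int) - (pvRank words "salad" false 0 words.length : Int)
  let burger_count : Int :=
    (pvRank words "hamburger" true 0 words.length : Int) - (pvRank words "hamburger" false 0 words.length : Int)
  let water_count : Int := (words.length : Int) - salad_count - burger_count
  "salad:" ++ PySem.Int.toStr salad_count ++ " hamburger:" ++ PySem.Int.toStr burger_count
    ++ " water:" ++ PySem.Int.toStr water_count

-- ===== PRECONDITION & SPEC =====
def Spec_item_order (order : String) (out : String) : Prop := out = item_order_alt order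
instance (order : String) (out : String) : Decidable (Spec_item_order order out) := by unfold Spec_item_order; infer_instance

-- ===== CLAIM (what is proved, stated in full; the proofs are below) =====
def Claim_equal_item_order : Prop := ∀ (order : String), Dom_item_order order → Spec_item_order order (item_order order)

-- ===== LEMMAS AND PROOFS =====

-- A's loop computes (b + #hamburger, w + #other, s + #salad) from any start state
theorem item_order_loop_eq (l : List String) (b w s : Int) :
    l.foldl (fun (st : Int × Int × Int) i =>
      if i = "salad" then (st.1, st.2.1, st.2.2 + 1)
      else if i = "hamburger" then (st.1 + 1, st.2.1, st.2.2)
      else (st.1, st.2.1 + 1, st.2.2)) (b, w, s)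
    = (b + l.count "hamburger",
       w + ((l.length : Int) - l.count "salad" - l.count "hamburger"),
       s + l.count "salad") := by
  induction l generalizing b w s with
  | nil => simp
  | cons x xs ih =>
    simp only [List.foldl_cons, List.count_cons, List.length_cons]
    by_cases hx : x = "salad"
    · simp [hx, ih]; omega
    · by_cases hy : x = "hamburger"
      · simp [hy, ih]; omega
      · simp [hx, hy, ih]; omega

-- a list whose predicate holds exactly on the first r indices has countP = r
theorem countP_of_index_prefix {α : Type} (l : List α) (p : α → Bool) (r : Nat) (hr : r ≤ l.length)
    (h1 : ∀ (j : Nat) (hj : j < l.length), j < r → p l[j] = true)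
    (h2 : ∀ (j : Nat) (hj : j < l.length), r ≤ j → ¬ p l[j] = true) :
    l.countP p = r := by
  conv_lhs => rw [← List.take_append_drop r l]
  rw [List.countP_append]
  have ht : (l.take r).countP p = (l.take r).length := by
    rw [List.countP_eq_length]
    intro a ha
    obtain ⟨j, hj, rfl⟩ := List.mem_iff_getElem.mp ha
    have hjl : j < l.length := lt_of_lt_of_le (lt_of_lt_of_le hj (by simp)) (le_refl _)
    rw [List.getElem_take]
    exact h1 j (by omega) (by simp at hj; omega)
  have hd : (l.drop r).countP p = 0 := by
    rw [List.countP_eq_zero]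
    intro a ha
    obtain ⟨j, hj, rfl⟩ := List.mem_iff_getElem.mp ha
    rw [List.getElem_drop]
    exact h2 (r + j) (by simp at hj; omega) (by omega)
  rw [ht, hd, List.length_take]
  omega

-- the binary search computes countP of its predicate, given the prefix invariant
theorem pvRank_eq (words : List String) (x : String) (inc : Bool)
    (hmono : ∀ (j k : Nat) (hj : j < words.length) (hk : k < words.length), j ≤ k →
      (words[k] < x ∨ (inc = true ∧ words[k] = x)) → (words[j] < x ∨ (inc = true ∧ words[j] = x))) :
    ∀ (lo hi : Nat), lo ≤ hi → hi ≤ words.length →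
      (∀ (j : Nat) (hj : j < words.length), j < lo → (words[j] < x ∨ (inc = true ∧ words[j] = x))) →
      (∀ (j : Nat) (hj : j < words.length), hi ≤ j → ¬ (words[j] < x ∨ (inc = true ∧ words[j] = x))) →
      pvRank words x inc lo hi
        = words.countP (fun w => decide (w < x ∨ (inc = true ∧ w = x))) := by
  intro lo hi
  fun_induction pvRank words x inc lo hi with
  | case1 lo hi h w hcond ih =>
    intro _ hhil hpre hpost
    have hmid : (lo + hi) / 2 < words.length := by omega
    have hw : w = words[(lo + hi) / 2] := by
      simp only [w, PySem.List.pyGetD_natCast]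
      exact List.getD_eq_getElem words "" hmid
    refine ih (by omega) hhil ?_ hpost
    intro j hj hjlt
    exact hmono j ((lo + hi) / 2) hj hmid (by omega) (hw ▸ hcond)
  | case2 lo hi h w hcond ih =>
    intro hle hhil hpre hpost
    have hmid : (lo + hi) / 2 < words.length := by omega
    have hw : w = words[(lo + hi) / 2] := by
      simp only [w, PySem.List.pyGetD_natCast]
      exact List.getD_eq_getElem words "" hmid
    refine ih (by omega) (by omega) hpre ?_
    intro j hj hjge hP
    by_cases hjh : j < hi
    · exact hcond (hw ▸ hmono ((lo + hi) / 2) j hmid hj hjge hP)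
    · exact hpost j hj (by omega) hP
  | case3 lo hi h =>
    intro hle hhil hpre hpost
    have hlohi : lo = hi := by omega
    refine (countP_of_index_prefix words _ lo (by omega) ?_ ?_).symm
    · intro j hj hjlo
      simpa using hpre j hj hjlo
    · intro j hj hjge hP
      exact hpost j hj (by omega) (by simpa using hP)

-- the ≤-count splits as the <-count plus the exact count
theorem countP_le_split (l : List String) (x : String) :
    l.countP (fun w => decide (w < x ∨ w = x))
      = l.countP (fun w => decide (w < x)) + l.count x := by
  induction l with
  | nil => simp
  | cons a t ih =>
    rw [List.countP_cons, List.countP_cons, List.count_cons, ih]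
    rcases lt_trichotomy a x with h | h | h
    · simp [h, ne_of_lt h]; omega
    · simp [h]; omega
    · simp [not_lt_of_gt h, ne_of_gt h]

-- ===== VERDICT (by name: the statement is the Claim_ definition above) =====
theorem item_order_spec : Claim_equal_item_order := by
  intro order _
  unfold Spec_item_order item_order item_order_alt
  simp only [item_order_loop_eq, zero_add]
  set array := PySem.Str.split₀ order with harr
  set words := PySem.List.sorted array (fun x => x) false with hwords
  have hperm : words.Perm array := PySem.List.sorted_perm array (fun x => x) false
  have hmono : ∀ (x : String) (inc : Bool), ∀ (j k : Nat) (hj : j < words.length) (hk : k < words.length), j ≤ k →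
      (words[k] < x ∨ (inc = true ∧ words[k] = x)) → (words[j] < x ∨ (inc = true ∧ words[j] = x)) := by
    intro x inc j k hj hk hjk hP
    have hle : words[j] ≤ words[k] := PySem.List.sorted_id_getElem_mono array hjk hk
    rcases hP with hlt | ⟨hinc, heq⟩
    · exact Or.inl (lt_of_le_of_lt hle hlt)
    · rcases lt_or_eq_of_le (heq ▸ hle) with h | h
      · exact Or.inl h
      · exact Or.inr ⟨hinc, h⟩
  have hrank : ∀ (x : String) (inc : Bool),
      pvRank words x inc 0 words.length
        = words.countP (fun w => decide (w < x ∨ (inc = true ∧ w = x))) := by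
    intro x inc
    refine pvRank_eq words x inc (hmono x inc) 0 words.length (Nat.zero_le _) (le_refl _) ?_ ?_
    · intro j hj hjlt; omega
    · intro j hj hjge; omega
  have hcount : ∀ (x : String),
      (pvRank words x true 0 words.length : Int) - (pvRank words x false 0 words.length : Int)
        = (array.count x : Int) := by
    intro x
    rw [hrank x true, hrank x false]
    have h1 : words.countP (fun w => decide (w < x ∨ (true = true ∧ w = x)))
        = words.countP (fun w => decide (w < x ∨ w = x)) := by
      apply List.countP_congr; intro a _; simp
    have h2 : words.countP (fun w => decide (w < x ∨ (false = true ∧ w = x)))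
        = words.countP (fun w => decide (w < x)) := by
      apply List.countP_congr; intro a _; simp
    rw [h1, h2, countP_le_split, hperm.count_eq]
    push_cast; ring
  have hlen : words.length = array.length := PySem.List.length_sorted array (fun x => x) false
  rw [hcount "salad", hcount "hamburger", hlen]
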